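-- pv_equiv track=rewrite | github.com/feraranas/ICPC-Algorithmic-Contests | BigONotationAnalysis/numberCommonNumbers.py | find_number_of_common_numbers
-- ===== SOURCE A (Python) =====
-- def find_number_of_common_numbers(array1, array2):
--      if (array1[-1] < array2[0]) or (array2[-1] < array1[0]):
--           return 0
--      count = 0
--      dictionary = dict()
--      if (len(array1) < len(array2)):
--           for a in array1:
--                dictionary[a] = 0
--           for a in array2:
--                if a in dictionary:
--                     count += 1
--      else:
--           for a in array2:
--                dictionary[a] = 0
--           for a in array1:
--                if a in dictionary:
--                     count += 1
--
--      return count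
-- ===== SOURCE B (Python) =====
-- def find_number_of_common_numbers(array1, array2):
--     if (array1[-1] < array2[0]) or (array2[-1] < array1[0]):
--         return 0
--     if len(array1) < len(array2):
--         small, big = array1, array2
--     else:
--         small, big = array2, array1
--     freq = {}
--     for x in big:
--         freq[x] = freq.get(x, 0) + 1
--     return sum(freq.get(x, 0) for x in set(small))
-- ===== Notes on version B (the rewrite author's own statement) =====
-- stated objective: alternative
-- what changed: Instead of seeding a zero-valued dict from the smaller array and counting membership hits while scanning the larger array, B builds a frequency table of the larger array and sums the frequencies over the distinct elements of the smaller array.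
import Mathlib
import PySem

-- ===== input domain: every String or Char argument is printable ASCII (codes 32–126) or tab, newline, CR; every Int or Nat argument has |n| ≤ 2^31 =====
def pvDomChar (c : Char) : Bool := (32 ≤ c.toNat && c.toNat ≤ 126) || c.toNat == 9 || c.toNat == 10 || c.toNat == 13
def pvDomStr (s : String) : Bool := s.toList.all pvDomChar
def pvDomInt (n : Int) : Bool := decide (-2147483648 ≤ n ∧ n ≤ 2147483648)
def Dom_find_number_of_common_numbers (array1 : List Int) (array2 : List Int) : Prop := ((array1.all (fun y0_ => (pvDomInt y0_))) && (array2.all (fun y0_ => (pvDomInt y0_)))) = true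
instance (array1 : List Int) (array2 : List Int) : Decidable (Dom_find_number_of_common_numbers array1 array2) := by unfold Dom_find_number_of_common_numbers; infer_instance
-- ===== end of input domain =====

-- B tabulates frequencies of the larger array and sums them over the distinct elements of the
-- smaller array, instead of A's zero-dict seeded from the smaller array scanned against the larger.


-- ===== PORT A =====
def find_number_of_common_numbers (array1 : List Int) (array2 : List Int) : Int :=
  match PySem.List.pyGet? array1 (-1), PySem.List.pyGet? array2 0,
        PySem.List.pyGet? array2 (-1), PySem.List.pyGet? array1 0 with
  | some a1l, some a2f, some a2l, some a1f =>
    if a1l < a2f ∨ a2l < a1f then 0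
    else if array1.length < array2.length then
      let dictionary := array1.foldl (fun d a => d.insert a (0 : Int)) PySem.Dict.empty
      array2.foldl (fun count a => if dictionary.contains a then count + 1 else count) (0 : Int)
    else
      let dictionary := array2.foldl (fun d a => d.insert a (0 : Int)) PySem.Dict.empty
      array1.foldl (fun count a => if dictionary.contains a then count + 1 else count) (0 : Int)
  | _, _, _, _ => 0  -- IndexError: excluded by Pre_

-- ===== PORT B =====
def find_number_of_common_numbers_alt (array1 : List Int) (array2 : List Int) : Int :=
  ((PySem.List.pyGet? array1 (-1)).bind (fun a1l =>
   (PySem.List.pyGet? array2 0).bind (fun a2f =>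
   (PySem.List.pyGet? array2 (-1)).bind (fun a2l =>
   (PySem.List.pyGet? array1 0).map (fun a1f =>
     if a1l < a2f ∨ a2l < a1f then 0
     else
       let sb := if array1.length < array2.length then (array1, array2) else (array2, array1)
       let freq := sb.2.foldl (fun d x => d.insert x (d.getD x 0 + 1)) PySem.Dict.empty
       ((PySem.Set.ofList sb.1).map (fun x => freq.getD x 0)).sum))))).getD 0  -- none = IndexError: excluded by Pre_

-- ===== PRECONDITION & SPEC =====
-- A raises IndexError (array1[-1] / array2[0]) exactly when either list is empty.
def Pre_find_number_of_common_numbers (array1 : List Int) (array2 : List Int) : Prop :=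
  array1 ≠ [] ∧ array2 ≠ []
instance (array1 : List Int) (array2 : List Int) : Decidable (Pre_find_number_of_common_numbers array1 array2) := by unfold Pre_find_number_of_common_numbers; infer_instance
def pvWitness_find_number_of_common_numbers : List Int × List Int := ([1, 2, 3], [2, 3, 4])

def Spec_find_number_of_common_numbers (array1 : List Int) (array2 : List Int) (out : Int) : Prop := out = find_number_of_common_numbers_alt array1 array2
instance (array1 : List Int) (array2 : List Int) (out : Int) : Decidable (Spec_find_number_of_common_numbers array1 array2 out) := by unfold Spec_find_number_of_common_numbers; infer_instance

-- ===== CLAIM (what is proved, stated in full; the proofs are below) =====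
def Claim_equal_find_number_of_common_numbers : Prop := ∀ (array1 : List Int) (array2 : List Int), Dom_find_number_of_common_numbers array1 array2 → Pre_find_number_of_common_numbers array1 array2 → Spec_find_number_of_common_numbers array1 array2 (find_number_of_common_numbers array1 array2)

-- ===== LEMMAS AND PROOFS =====

-- A's zero-valued dict seeded from xs answers membership in xs.
theorem contains_foldl_insert_zero (xs : List Int) (d : PySem.Dict Int Int) (v : Int) :
    (xs.foldl (fun d a => d.insert a (0 : Int)) d).contains v
      = (d.contains v || xs.contains v) := by
  induction xs generalizing d with
  | nil => simp
  | cons a t ih =>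
      simp only [List.foldl_cons, ih, List.contains_cons, PySem.Dict.contains_insert]
      by_cases h : v = a <;> simp [h, Bool.or_comm, Bool.or_left_comm, Bool.or_assoc]

-- Nodup sum of indicator.
theorem sum_indicator_nodup (S : List Int) (b : Int) (h : S.Nodup) :
    (S.map (fun x => if x = b then (1 : Int) else 0)).sum = if b ∈ S then 1 else 0 := by
  induction S with
  | nil => simp
  | cons s t ih =>
      simp only [List.map_cons, List.sum_cons, List.mem_cons]
      rcases List.nodup_cons.mp h with ⟨hs, ht⟩
      rw [ih ht]
      by_cases hb : s = b
      · subst hb; simp [hs]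
      · by_cases hm : b ∈ t <;> simp [hb, hm, Ne.symm hb]

-- Σ over a nodup list of multiplicities in big = number of elements of big lying in the list.
theorem sum_count_eq_countP (S big : List Int) (h : S.Nodup) :
    (S.map (fun x => (big.count x : Int))).sum = (big.countP (fun a => S.contains a) : Int) := by
  induction big with
  | nil => simp
  | cons b t ih =>
      have hcnt : ∀ x : Int, ((b :: t).count x : Int) = (t.count x : Int) + (if x = b then 1 else 0) := by
        intro x; rw [List.count_cons]; push_cast; by_cases hbx : x = b
        · simp [hbx]
        · simp [hbx]
          exact fun h => hbx h.symm
      calc (S.map (fun x => ((b :: t).count x : Int))).sum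
          = (S.map (fun x => (t.count x : Int) + (if x = b then (1:Int) else 0))).sum := by
            simp only [hcnt]
        _ = (S.map (fun x => (t.count x : Int))).sum
              + (S.map (fun x => if x = b then (1:Int) else 0)).sum := by
            rw [← List.sum_map_add]
        _ = (t.countP (fun a => S.contains a) : Int) + (if b ∈ S then 1 else 0) := by
            rw [ih, sum_indicator_nodup S b h]
        _ = ((b :: t).countP (fun a => S.contains a) : Int) := by
            rw [List.countP_cons]
            push_cast
            by_cases hm : b ∈ S <;> simp [hm]

-- Branch body equality: A's membership count over big against small's key-dict equals
-- B's frequency sum over small's distinct elements.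
theorem branch_eq (small big : List Int) :
    big.foldl (fun count a =>
        if (small.foldl (fun d a => d.insert a (0 : Int)) PySem.Dict.empty).contains a
        then count + 1 else count) (0 : Int)
      = ((PySem.Set.ofList small).map (fun x =>
          (big.foldl (fun d x => d.insert x (d.getD x 0 + 1)) PySem.Dict.empty).getD x 0)).sum := by
  have hc : ∀ a : Int,
      (small.foldl (fun d a => d.insert a (0 : Int)) PySem.Dict.empty).contains a
        = small.contains a := by
    intro a; rw [contains_foldl_insert_zero]; simp
  simp only [hc]
  rw [PySem.List.foldl_if_add_one]
  have hfreq : big.foldl (fun d x => d.insert x (d.getD x 0 + 1)) PySem.Dict.empty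
      = PySem.Dict.counter big := PySem.Dict.foldl_insert_getD_add_one_eq_counter big
  rw [hfreq]
  simp only [PySem.Dict.getD_counter]
  rw [sum_count_eq_countP _ _ (PySem.Set.nodup_ofList small)]
  have hco : big.countP (fun a => List.contains (PySem.Set.ofList small) a)
      = big.countP small.contains :=
    List.countP_congr (fun a _ => by simp [PySem.Set.mem_ofList])
  rw [hco]
  exact zero_add _

-- ===== VERDICT (by name: the statement is the Claim_ definition above) =====
theorem find_number_of_common_numbers_spec : Claim_equal_find_number_of_common_numbers := by
  intro array1 array2 _ hpre
  unfold Spec_find_number_of_common_numbers find_number_of_common_numbers find_number_of_common_numbers_alt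
  cases h1 : PySem.List.pyGet? array1 (-1) <;>
  cases h2 : PySem.List.pyGet? array2 0 <;>
  cases h3 : PySem.List.pyGet? array2 (-1) <;>
  cases h4 : PySem.List.pyGet? array1 0 <;> try rfl
  simp only [Option.map_some, Option.getD_some, Option.bind]
  split
  · rfl
  · split <;> exact branch_eq _ _
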